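-- pv_equiv track=rewrite | github.com/emares17/dailycodewarssolutions | 01-23-2023.py | ascend_descend
-- ===== SOURCE A (Python) =====
-- def ascend_descend(length, min, max):
--     if max < min or length == 0:
--         return ""
--     res = ''
--     while len(res) < length:
--         for i in range(min, max + 1):
--             if len(res) < length:
--                 res += str(i)
--         for i in range(max-1, min, -1):
--             if len(res) < length:
--                 res += str(i)
--     return res[:length]
-- ===== SOURCE B (Python) =====
-- def ascend_descend(length, min, max):
--     if max < min or length <= 0:
--         return ""
--     period = "".join(str(i) for i in range(min, max + 1)) + "".join(str(i) for i in range(max - 1, min, -1))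
--     return (period * (length // len(period) + 1))[:length]
-- ===== Notes on version B (the rewrite author's own statement) =====
-- stated objective: simpler
-- what changed: A's length-guarded while-loop with two guarded inner for-loops is replaced by building the one-period string once, replicating it arithmetically (length // len(period) + 1 copies) and truncating to length.
import Mathlib
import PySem

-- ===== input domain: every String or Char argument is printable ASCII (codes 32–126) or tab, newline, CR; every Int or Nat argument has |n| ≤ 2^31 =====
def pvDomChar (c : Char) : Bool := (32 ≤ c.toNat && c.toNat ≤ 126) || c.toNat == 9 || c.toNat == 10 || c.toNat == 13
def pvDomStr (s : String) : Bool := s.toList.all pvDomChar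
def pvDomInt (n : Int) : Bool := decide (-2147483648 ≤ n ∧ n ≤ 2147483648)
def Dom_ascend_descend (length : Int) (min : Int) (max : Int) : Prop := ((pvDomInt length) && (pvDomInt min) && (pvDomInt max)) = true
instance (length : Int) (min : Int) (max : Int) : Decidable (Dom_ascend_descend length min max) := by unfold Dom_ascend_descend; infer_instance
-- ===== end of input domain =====

-- B replaces A's length-guarded while/for accumulation by building the one-period string once and
-- replicating-then-truncating it arithmetically (objective: simpler; return values proved equal).

-- ===== PORT A =====
-- one guarded append step: `if len(res) < length: res += str(i)`
def pvStep (L : Int) (r : List Char) (i : Int) : List Char :=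
  if (r.length : Int) < L then r ++ PySem.Int.toChars i else r

-- one iteration of A's while-loop body (the two `for` loops)
def pvBody (L mn mx : Int) (res : List Char) : List Char :=
  (PySem.List.pyRange (mx - 1) mn (-1)).foldl (pvStep L)
    ((PySem.List.pyRange mn (mx + 1) 1).foldl (pvStep L) res)

-- termination facts for the while-loop (cited by `decreasing_by` of pvLoop)
theorem pvStep_len (L : Int) (r : List Char) (i : Int) : r.length ≤ (pvStep L r i).length := by
  unfold pvStep; split <;> simp

theorem pvFold_len (L : Int) (xs : List Int) : ∀ r : List Char, r.length ≤ (xs.foldl (pvStep L) r).length := by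
  induction xs with
  | nil => intro r; simp
  | cons i xs ih => intro r; exact le_trans (pvStep_len L r i) (ih _)

theorem pvToDigitsCore_len (b : Nat) : ∀ (fuel n : Nat) (ds : List Char), ds.length ≤ (Nat.toDigitsCore b fuel n ds).length := by
  intro fuel
  induction fuel with
  | zero => intro n ds; simp [Nat.toDigitsCore]
  | succ f ih =>
    intro n ds
    simp only [Nat.toDigitsCore]
    split
    · simp
    · exact le_trans (by simp) (ih _ _)

theorem pv_toChars_pos (n : Int) : 0 < (PySem.Int.toChars n).length := by
  unfold PySem.Int.toChars
  split
  · simp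
  · unfold Nat.toDigits
    simp only [Nat.toDigitsCore]
    split
    · simp
    · exact lt_of_lt_of_le (by simp) (pvToDigitsCore_len _ _ _ _)

-- each while-iteration strictly lengthens res (needed for pvLoop's termination)
theorem pvBody_gt {L mn mx : Int} {res : List Char} (h : mn ≤ mx) (hg : (res.length : Int) < L) :
    res.length < (pvBody L mn mx res).length := by
  unfold pvBody
  refine lt_of_lt_of_le ?_ (pvFold_len L _ _)
  rw [PySem.List.pyRange_one_cons (show mn < mx + 1 by omega)]
  simp only [List.foldl_cons]
  have hstep : pvStep L res mn = res ++ PySem.Int.toChars mn := by unfold pvStep; rw [if_pos hg]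
  rw [hstep]
  refine lt_of_lt_of_le ?_ (pvFold_len L _ _)
  have := pv_toChars_pos mn
  simp; omega

-- A's `while len(res) < length:` loop
def pvLoop (L mn mx : Int) (h : mn ≤ mx) (res : List Char) : List Char :=
  if hg : (res.length : Int) < L then pvLoop L mn mx h (pvBody L mn mx res) else res
termination_by (L - (res.length : Int)).toNat
decreasing_by
  have h1 := pvBody_gt h hg
  omega

def ascend_descend (length : Int) (min : Int) (max : Int) : String :=
  if h : max < min ∨ length = 0 then ""
  else String.ofList (PySem.List.slice
    (pvLoop length min max (not_lt.mp (not_or.mp h).1) []) none (some length))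

-- ===== PORT B =====
-- period = "".join(str(i) for i in range(min, max+1)) + "".join(str(i) for i in range(max-1, min, -1))
def pvPeriod (mn mx : Int) : List Char :=
  ((PySem.List.pyRange mn (mx + 1) 1).map PySem.Int.toChars).flatten ++
  ((PySem.List.pyRange (mx - 1) mn (-1)).map PySem.Int.toChars).flatten

def ascend_descend_alt (length : Int) (min : Int) (max : Int) : String :=
  if max < min ∨ length ≤ 0 then ""
  else String.ofList (PySem.List.slice
    (PySem.List.pyRepeat (pvPeriod min max)
      (PySem.Int.floordiv length ((pvPeriod min max).length : Int) + 1)) none (some length))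

-- ===== PRECONDITION & SPEC =====
def Spec_ascend_descend (length : Int) (min : Int) (max : Int) (out : String) : Prop := out = ascend_descend_alt length min max
instance (length : Int) (min : Int) (max : Int) (out : String) : Decidable (Spec_ascend_descend length min max out) := by unfold Spec_ascend_descend; infer_instance

-- ===== CLAIM (what is proved, stated in full; the proofs are below) =====
def Claim_equal_ascend_descend : Prop := ∀ (length : Int) (min : Int) (max : Int), Dom_ascend_descend length min max → Spec_ascend_descend length min max (ascend_descend length min max)

-- ===== LEMMAS AND PROOFS =====

-- `period` repeated m times
def pvR (P : List Char) (m : Nat) : List Char := (List.replicate m P).flatten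

theorem pvR_succ (P : List Char) (m : Nat) : pvR P (m + 1) = pvR P m ++ P := by
  unfold pvR
  rw [List.replicate_succ', List.flatten_append]
  simp

theorem pvR_add (P : List Char) (m j : Nat) : pvR P (m + j) = pvR P m ++ pvR P j := by
  unfold pvR
  rw [List.replicate_add, List.flatten_append]

theorem pvR_len (P : List Char) (m : Nat) : (pvR P m).length = m * P.length := by
  induction m with
  | zero => simp [pvR]
  | succ m ih => rw [pvR_succ, List.length_append, ih, Nat.succ_mul]

theorem pvPrefix_take {r x : List Char} (hp : r <+: x) {N : Nat} (hN : N ≤ r.length) :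
    x.take N = r.take N := by
  obtain ⟨t, rfl⟩ := hp
  rw [List.take_append_of_le_length hN]

theorem pvR_take_eq (P : List Char) {m j N : Nat} (hmj : m ≤ j) (hN : N ≤ (pvR P m).length) :
    (pvR P m).take N = (pvR P j).take N := by
  obtain ⟨d, rfl⟩ := Nat.le.dest hmj
  rw [pvR_add]
  exact (List.take_append_of_le_length hN).symm

theorem pvR_take_eq' (P : List Char) {m j N : Nat} (hm : N ≤ (pvR P m).length) (hj : N ≤ (pvR P j).length) :
    (pvR P m).take N = (pvR P j).take N := by
  rcases le_total m j with hc | hc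
  · exact pvR_take_eq P hc hm
  · exact (pvR_take_eq P hc hj).symm

-- once len(res) ≥ length, a guarded for-loop leaves res unchanged
theorem pvFold_stuck (L : Int) (xs : List Int) : ∀ r : List Char, L ≤ (r.length : Int) → xs.foldl (pvStep L) r = r := by
  induction xs with
  | nil => intro r _; rfl
  | cons i xs ih =>
    intro r hr
    have hstep : pvStep L r i = r := by unfold pvStep; rw [if_neg (not_lt.mpr hr)]
    simp only [List.foldl_cons, hstep]
    exact ih r hr

-- a guarded for-loop either appends all its pieces, or stops with len(res) ≥ length; always a prefix
theorem pvFold_cases (L : Int) (xs : List Int) : ∀ r : List Char,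
    xs.foldl (pvStep L) r <+: r ++ (xs.map PySem.Int.toChars).flatten ∧
    (xs.foldl (pvStep L) r = r ++ (xs.map PySem.Int.toChars).flatten ∨
      L ≤ ((xs.foldl (pvStep L) r).length : Int)) := by
  induction xs with
  | nil => intro r; simp
  | cons i xs ih =>
    intro r
    by_cases hg : (r.length : Int) < L
    · have hstep : pvStep L r i = r ++ PySem.Int.toChars i := by unfold pvStep; rw [if_pos hg]
      simp only [List.foldl_cons, hstep, List.map_cons, List.flatten_cons, ← List.append_assoc]
      exact ih (r ++ PySem.Int.toChars i)
    · have hstep : pvStep L r i = r := by unfold pvStep; rw [if_neg hg]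
      have hfix : xs.foldl (pvStep L) r = r := pvFold_stuck L xs r (not_lt.mp hg)
      simp only [List.foldl_cons, hstep, hfix]
      exact ⟨List.prefix_append r _, Or.inr (not_lt.mp hg)⟩

-- one while-iteration: either exactly one more period, or the loop is about to stop; always a prefix
theorem pvBody_cases (L mn mx : Int) (res : List Char) :
    pvBody L mn mx res <+: res ++ pvPeriod mn mx ∧
    (pvBody L mn mx res = res ++ pvPeriod mn mx ∨ L ≤ ((pvBody L mn mx res).length : Int)) := by
  unfold pvBody pvPeriod
  obtain ⟨h1, h2⟩ := pvFold_cases L (PySem.List.pyRange mn (mx + 1) 1) res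
  rcases h2 with heq | hlen
  · rw [heq]
    obtain ⟨g1, g2⟩ := pvFold_cases L (PySem.List.pyRange (mx - 1) mn (-1))
      (res ++ ((PySem.List.pyRange mn (mx + 1) 1).map PySem.Int.toChars).flatten)
    rw [List.append_assoc] at *
    exact ⟨g1, g2⟩
  · have hfix := pvFold_stuck L (PySem.List.pyRange (mx - 1) mn (-1)) _ hlen
    rw [hfix]
    refine ⟨h1.trans ?_, Or.inr hlen⟩
    rw [← List.append_assoc]
    exact List.prefix_append _ _
  
theorem pvPeriod_pos {mn mx : Int} (h : mn ≤ mx) : 0 < (pvPeriod mn mx).length := by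
  have h1 := pv_toChars_pos mn
  rw [pvPeriod, PySem.List.pyRange_one_cons (show mn < mx + 1 by omega)]
  simp only [List.map_cons, List.flatten_cons, List.length_append]
  omega

-- the while-loop: its result is a prefix of some power of the period, of length ≥ `length`
theorem pvLoop_spec (L mn mx : Int) (h : mn ≤ mx) :
    ∀ (n k : Nat) (res : List Char), res = pvR (pvPeriod mn mx) k →
      (L - (res.length : Int)).toNat ≤ n →
      ∃ m : Nat, pvLoop L mn mx h res <+: pvR (pvPeriod mn mx) m ∧
        L ≤ ((pvLoop L mn mx h res).length : Int) := by
  intro n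
  induction n with
  | zero =>
    intro k res hres hfuel
    have hL : L ≤ (res.length : Int) := by omega
    rw [pvLoop, dif_neg (not_lt.mpr hL)]
    exact ⟨k, by rw [hres], hL⟩
  | succ n ih =>
    intro k res hres hfuel
    by_cases hg : (res.length : Int) < L
    · rw [pvLoop, dif_pos hg]
      obtain ⟨hpre, hcase⟩ := pvBody_cases L mn mx res
      rcases hcase with heq | hlen
      · have hbody : pvBody L mn mx res = pvR (pvPeriod mn mx) (k + 1) := by
          rw [heq, hres, pvR_succ]
        have hlt := pvBody_gt h hg
        exact ih (k + 1) _ hbody (by omega)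
      · rw [pvLoop, dif_neg (not_lt.mpr hlen)]
        refine ⟨k + 1, ?_, hlen⟩
        rw [pvR_succ, ← hres]
        exact hpre
    · rw [pvLoop, dif_neg hg]
      exact ⟨k, by rw [hres], not_lt.mp hg⟩

theorem pv_slice_nil (b : Int) : PySem.List.slice ([] : List Char) none (some b) = [] := by
  simp [PySem.List.slice]

theorem pv_main (L mn mx : Int) : ascend_descend L mn mx = ascend_descend_alt L mn mx := by
  unfold ascend_descend ascend_descend_alt
  by_cases hguardB : mx < mn ∨ L ≤ 0
  · rw [if_pos hguardB]
    by_cases hguardA : mx < mn ∨ L = 0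
    · rw [dif_pos hguardA]
    · rw [dif_neg hguardA]
      have hLneg : L < 0 := by
        rcases hguardB with h | h
        · exact absurd (Or.inl h) hguardA
        · exact lt_of_le_of_ne h (fun he => hguardA (Or.inr he))
      have hloop : pvLoop L mn mx (not_lt.mp (not_or.mp hguardA).1) [] = [] := by
        rw [pvLoop, dif_neg (by simp; omega)]
      rw [hloop, pv_slice_nil]
  · obtain ⟨h1, h2⟩ := not_or.mp hguardB
    have hL : 0 < L := by omega
    have hguardA : ¬ (mx < mn ∨ L = 0) := by
      rintro (hc | hc)
      · exact h1 hc
      · omega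
    rw [dif_neg hguardA, if_neg hguardB]
    have hle : mn ≤ mx := not_lt.mp (not_or.mp hguardA).1
    have hp : 0 < (pvPeriod mn mx).length := pvPeriod_pos hle
    have hpi : (0 : Int) < ((pvPeriod mn mx).length : Int) := by exact_mod_cast hp
    have hfd : PySem.Int.floordiv L ((pvPeriod mn mx).length : Int) = L / ((pvPeriod mn mx).length : Int) := by
      unfold PySem.Int.floordiv
      rw [Int.fdiv_eq_ediv, if_pos (Or.inl hpi.le), sub_zero]
    obtain ⟨m, hpre, hlen⟩ := pvLoop_spec L mn mx (not_lt.mp (not_or.mp hguardA).1) L.toNat 0 [] rfl (by simp)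
    rw [PySem.List.slice_to _ hL.le, PySem.List.slice_to _ hL.le]
    congr 1
    have hN : L.toNat ≤ (pvLoop L mn mx (not_lt.mp (not_or.mp hguardA).1) []).length := by omega
    rw [← pvPrefix_take hpre hN]
    have hrepr : PySem.List.pyRepeat (pvPeriod mn mx)
        (PySem.Int.floordiv L ((pvPeriod mn mx).length : Int) + 1) =
        pvR (pvPeriod mn mx) (PySem.Int.floordiv L ((pvPeriod mn mx).length : Int) + 1).toNat := rfl
    rw [hrepr]
    apply pvR_take_eq' (pvPeriod mn mx)
    · exact le_trans hN hpre.length_le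
    · set pp : Int := ((pvPeriod mn mx).length : Int) with hpp
      set d : Int := L / pp with hd
      have hdiv : pp * d + L % pp = L := Int.mul_ediv_add_emod L pp
      have hmod1 : 0 ≤ L % pp := Int.emod_nonneg L (by omega)
      have hmod2 : L % pp < pp := Int.emod_lt_of_pos L hpi
      have hdnn : 0 ≤ d := Int.ediv_nonneg hL.le hpi.le
      have hq : PySem.Int.floordiv L pp + 1 = d + 1 := by rw [hfd]
      rw [hq, pvR_len]
      have hcast : (((d + 1).toNat * (pvPeriod mn mx).length : Nat) : Int) = (d + 1) * pp := by
        push_cast [Int.toNat_of_nonneg (by omega : (0:Int) ≤ d + 1)]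
        rw [hpp]
      have hmul : (d + 1) * pp = pp * d + pp := by ring
      omega

-- ===== VERDICT (by name: the statement is the Claim_ definition above) =====
theorem ascend_descend_spec : Claim_equal_ascend_descend := by
  intro L mn mx _
  unfold Spec_ascend_descend
  exact pv_main L mn mx
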